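-- pv_equiv track=rewrite | github.com/arvindpandey4/BridgeLabz-Training-Indexnine | review_task/task.py | validate_logs
-- ===== SOURCE A (Python) =====
-- def validate_logs(logs):
--     valid_levels = ["INFO", "WARNING", "ERROR"]
--     prev_level = None
--
--     for log in logs:
--         parts = log.split(":")
--         if len(parts) < 2:
--             return False
--
--         level = parts[0]
--
--         if level not in valid_levels:
--             return False
--
--         if level == "ERROR" and prev_level == "ERROR":
--             return False
--
--         prev_level = level
--
--     return True
-- ===== SOURCE B (Python) =====
-- def validate_logs(logs):
--     valid_levels = {"INFO", "WARNING", "ERROR"}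
--     levels = []
--     for log in logs:
--         parts = log.split(":")
--         if len(parts) < 2 or parts[0] not in valid_levels:
--             return False
--         levels.append(parts[0])
--     return not any(a == "ERROR" and b == "ERROR" for a, b in zip(levels, levels[1:]))
-- ===== Notes on version B (the rewrite author's own statement) =====
-- stated objective: alternative
-- what changed: B replaces A's running prev_level state with two separate phases: one loop parses/validates and collects the levels, then a pairwise zip scan checks the consecutive-ERROR rule (equivalent because any input that trips A's adjacency check either also fails B's parse loop earlier or fails the final pairwise scan).
import Mathlib
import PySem

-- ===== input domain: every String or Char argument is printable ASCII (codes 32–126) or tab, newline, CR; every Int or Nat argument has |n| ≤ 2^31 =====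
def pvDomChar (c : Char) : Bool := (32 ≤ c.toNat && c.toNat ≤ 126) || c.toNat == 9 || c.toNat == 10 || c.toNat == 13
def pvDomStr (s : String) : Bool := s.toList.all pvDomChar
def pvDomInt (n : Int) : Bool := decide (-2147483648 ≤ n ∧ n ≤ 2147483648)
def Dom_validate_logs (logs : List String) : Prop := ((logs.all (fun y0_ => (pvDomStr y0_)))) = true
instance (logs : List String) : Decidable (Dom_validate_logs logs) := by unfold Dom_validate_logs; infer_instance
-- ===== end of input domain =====

-- B splits A's single stateful loop into a parse/collect loop followed by a pairwise zip scan
-- for the consecutive-ERROR rule (alternative decomposition, same cost).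


-- ===== PORT A =====
-- A's loop: running prev_level state, early False returns.
def validate_logs_go (logs : List String) (prev_level : Option String) : Bool :=
  match logs with
  | [] => true
  | log :: rest =>
    let parts := (PySem.Str.split? log ":").getD []
    if parts.length < 2 then false
    else
      let level := parts.headD ""
      if !(["INFO", "WARNING", "ERROR"].contains level) then false
      else if level == "ERROR" && prev_level == some "ERROR" then false
      else validate_logs_go rest (some level)

def validate_logs (logs : List String) : Bool :=
  validate_logs_go logs none

-- ===== PORT B =====
-- B's first loop: parse and validate each log, collecting levels (early False on a bad log).
def validate_logs_alt_collect (logs : List String) (levels : List String) : Bool :=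
  match logs with
  | [] =>
    -- final pairwise scan: not any(a == 'ERROR' and b == 'ERROR' for a, b in zip(levels, levels[1:]))
    !((levels.zip levels.tail).any (fun p => p.1 == "ERROR" && p.2 == "ERROR"))
  | log :: rest =>
    let parts := (PySem.Str.split? log ":").getD []
    if parts.length < 2 || !((PySem.Set.ofList ["INFO", "WARNING", "ERROR"]).contains (parts.headD "")) then false
    else validate_logs_alt_collect rest (levels ++ [parts.headD ""])

def validate_logs_alt (logs : List String) : Bool :=
  validate_logs_alt_collect logs []

-- ===== PRECONDITION & SPEC =====
def Spec_validate_logs (logs : List String) (out : Bool) : Prop := out = validate_logs_alt logs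
instance (logs : List String) (out : Bool) : Decidable (Spec_validate_logs logs out) := by unfold Spec_validate_logs; infer_instance

-- ===== CLAIM (what is proved, stated in full; the proofs are below) =====
def Claim_equal_validate_logs : Prop := ∀ (logs : List String), Dom_validate_logs logs → Spec_validate_logs logs (validate_logs logs)

-- ===== LEMMAS AND PROOFS =====

-- the pairwise scan, in the recursive shape the proofs use
def noAdjErr : List String → Bool
  | a :: b :: rest => !(a == "ERROR" && b == "ERROR") && noAdjErr (b :: rest)
  | _ => true

theorem zipAny_eq_noAdjErr (levels : List String) :
    (!((levels.zip levels.tail).any (fun p => p.1 == "ERROR" && p.2 == "ERROR"))) = noAdjErr levels := by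
  induction levels with
  | nil => rfl
  | cons a tl ih =>
    cases tl with
    | nil => rfl
    | cons b rest =>
      simp only [List.tail, List.zip, List.zipWith, List.any, noAdjErr] at *
      rw [← ih]
      simp [Bool.not_and, Bool.not_or]

theorem noAdjErr_append_singleton (xs : List String) (x : String) :
    noAdjErr (xs ++ [x]) =
      (noAdjErr xs && !(xs.getLast? == some "ERROR" && x == "ERROR")) := by
  induction xs with
  | nil => simp [noAdjErr]
  | cons a tl ih =>
    cases tl with
    | nil => simp [noAdjErr, Bool.and_comm]
    | cons b rest =>
      simp only [List.cons_append, noAdjErr] at *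
      rw [ih]
      simp [List.getLast?_cons_cons, Bool.and_assoc]

theorem collect_false_of_noAdjErr_false (logs : List String) (levels : List String)
    (h : noAdjErr levels = false) : validate_logs_alt_collect logs levels = false := by
  induction logs generalizing levels with
  | nil => simp [validate_logs_alt_collect, zipAny_eq_noAdjErr, h]
  | cons log rest ih =>
    simp only [validate_logs_alt_collect]
    split
    · rfl
    · apply ih
      rw [noAdjErr_append_singleton, h, Bool.false_and]

theorem go_eq_collect (logs : List String) (levels : List String)
    (h : noAdjErr levels = true) :
    validate_logs_go logs levels.getLast? = validate_logs_alt_collect logs levels := by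
  induction logs generalizing levels with
  | nil => simp [validate_logs_go, validate_logs_alt_collect, zipAny_eq_noAdjErr, h]
  | cons log rest ih =>
    simp only [validate_logs_go, validate_logs_alt_collect]
    by_cases hlen : ((PySem.Str.split? log ":").getD []).length < 2
    · simp [hlen]
    · set level := ((PySem.Str.split? log ":").getD []).headD "" with hl
      have hof : PySem.Set.ofList ["INFO", "WARNING", "ERROR"] = ["INFO", "WARNING", "ERROR"] := rfl
      by_cases hmem : (["INFO", "WARNING", "ERROR"] : List String).contains level = true
      · by_cases herr : level = "ERROR"
        · by_cases hprev : levels.getLast? = some "ERROR"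
          · have hno : noAdjErr (levels ++ [level]) = false := by
              rw [noAdjErr_append_singleton, h]; simp [herr, hprev]
            rw [herr] at hno
            simp [hlen, hof, herr, hprev, collect_false_of_noAdjErr_false rest _ hno]
          · have hna : noAdjErr (levels ++ [level]) = true := by
              rw [noAdjErr_append_singleton, h]; simp [hprev]
            have hrec := ih (levels ++ [level]) hna
            have hlast : (levels ++ [level]).getLast? = some level := by simp
            rw [hlast, herr] at hrec
            simp [hlen, hof, herr, hprev, hrec]
        · have hna : noAdjErr (levels ++ [level]) = true := by
            rw [noAdjErr_append_singleton, h]; simp [herr]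
          have hrec := ih (levels ++ [level]) hna
          have hlast : (levels ++ [level]).getLast? = some level := by simp
          rw [hlast] at hrec
          simp [hlen, hof, herr, hrec]
      · have hm' : level ≠ "INFO" ∧ level ≠ "WARNING" ∧ level ≠ "ERROR" := by simpa using hmem
        simp [hlen, hof, hm'.1, hm'.2.1, hm'.2.2]

-- ===== VERDICT (by name: the statement is the Claim_ definition above) =====
theorem validate_logs_spec : Claim_equal_validate_logs := by
  intro logs _
  unfold Spec_validate_logs validate_logs validate_logs_alt
  have := go_eq_collect logs [] rfl
  simpa using this
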